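-- pv_equiv track=rewrite | github.com/jwassmer/hidden-risk | src/EmergencyModule.py | keep_longest_unique_sublists_with_distances
-- ===== SOURCE A (Python) =====
-- def keep_longest_unique_sublists_with_distances(input_list_with_distances):
--     # Create a dictionary to hold the longest sublist for each unique number, along with its distance
--     longest_sublists_with_distances = {}
--
--     # Iterate through the original list to populate the dictionary
--     for sublist, distance in input_list_with_distances:
--         for item in sublist:
--             # Update the dictionary only if the item is not already a key,
--             # or if the current sublist is longer than the stored one
--             if item not in longest_sublists_with_distances or len(sublist) > len(
--                 longest_sublists_with_distances[item][0]
--             ):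
--                 longest_sublists_with_distances[item] = (sublist, distance)
--
--     # Extract the unique longest sublists and their distances while preserving the original list's order
--     unique_longest_sublists_with_distances = []
--     seen_sublists = set()
--     for sublist, distance in input_list_with_distances:
--         # Convert the sublist to a tuple for hashability
--         sublist_tuple = tuple(sublist)
--         if sublist_tuple in seen_sublists:
--             continue  # Skip if we've already added this sublist
--         if all(
--             item in longest_sublists_with_distances
--             and longest_sublists_with_distances[item][0] == sublist
--             for item in sublist
--         ):
--             unique_longest_sublists_with_distances.append((sublist, distance))
--             seen_sublists.add(sublist_tuple)
--
--     return unique_longest_sublists_with_distances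
-- ===== SOURCE B (Python) =====
-- def keep_longest_unique_sublists_with_distances(input_list_with_distances):
--     # Declarative rewrite: a sublist is kept iff it is the first occurrence of its
--     # value and it is the "champion" (first longest sublist containing x) of every
--     # item x it contains.  No dictionary is maintained.
--     subs = [sublist for sublist, _ in input_list_with_distances]
--
--     def champion(x):
--         candidates = [s for s in subs if x in s]
--         longest = max(map(len, candidates))
--         return next(s for s in candidates if len(s) == longest)
--
--     result = []
--     for i, (sublist, distance) in enumerate(input_list_with_distances):
--         if sublist in subs[:i]:
--             continue
--         if all(champion(x) == sublist for x in sublist):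
--             result.append((sublist, distance))
--     return result
-- ===== Notes on version B (the rewrite author's own statement) =====
-- stated objective: alternative
-- what changed: A maintains a dictionary mapping each item to its incrementally-updated longest (sublist, distance) in a stateful first pass and a seen-set of kept tuples; B drops the dictionary entirely and, for each first occurrence of a sublist value (dedup by membership in the preceding prefix), checks declaratively that the sublist is the 'champion' of every item it contains, computed per item as filter-candidates / max length / first match.
import Mathlib
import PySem

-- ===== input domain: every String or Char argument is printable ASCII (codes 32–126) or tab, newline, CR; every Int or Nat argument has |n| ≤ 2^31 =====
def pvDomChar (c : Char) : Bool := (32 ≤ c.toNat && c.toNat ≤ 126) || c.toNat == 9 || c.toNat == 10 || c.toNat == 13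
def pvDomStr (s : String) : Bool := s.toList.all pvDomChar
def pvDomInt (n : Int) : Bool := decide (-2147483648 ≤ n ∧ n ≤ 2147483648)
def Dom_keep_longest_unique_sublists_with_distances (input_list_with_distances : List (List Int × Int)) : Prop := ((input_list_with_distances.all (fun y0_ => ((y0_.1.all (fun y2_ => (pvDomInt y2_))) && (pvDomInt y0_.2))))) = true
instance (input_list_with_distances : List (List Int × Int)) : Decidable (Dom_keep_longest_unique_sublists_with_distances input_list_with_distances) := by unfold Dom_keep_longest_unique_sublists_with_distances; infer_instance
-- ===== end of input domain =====

-- B replaces A's incrementally-maintained "longest sublist per item" dictionary by a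
-- declarative per-item "champion" query (filter + max + first match) with prefix-based
-- dedup; objective: simpler/alternative decomposition, not speed.

-- ===== PORT A =====
-- inner loop: 'for item in sublist: if item not in d or len(sublist) > len(d[item][0]): d[item] = (sublist, distance)'
def klA_update (sublist : List Int) (distance : Int)
    (d : PySem.Dict Int (List Int × Int)) : PySem.Dict Int (List Int × Int) :=
  sublist.foldl (fun d item =>
    match d.get? item with
    | none => d.insert item (sublist, distance)
    | some q => if sublist.length > q.1.length then d.insert item (sublist, distance) else d) d

-- pass 1 of A
def klA_pass1 (input : List (List Int × Int)) : PySem.Dict Int (List Int × Int) :=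
  input.foldl (fun d p => klA_update p.1 p.2 d) PySem.Dict.empty

-- 'all(item in d and d[item][0] == sublist for item in sublist)'
def klA_check (d : PySem.Dict Int (List Int × Int)) (sublist : List Int) : Bool :=
  sublist.all (fun item =>
    match d.get? item with
    | none => false
    | some q => q.1 == sublist)

def keep_longest_unique_sublists_with_distances (input_list_with_distances : List (List Int × Int)) : List (List Int × Int) :=
  let d := klA_pass1 input_list_with_distances
  (input_list_with_distances.foldl
    (fun (acc : List (List Int × Int) × PySem.Set (List Int)) p =>
      if PySem.Set.contains acc.2 p.1 then acc
      else if klA_check d p.1 then (acc.1 ++ [p], PySem.Set.add acc.2 p.1)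
      else acc)
    ([], PySem.Set.empty)).1

-- ===== PORT B =====
-- champion(x): candidates = [s for s in subs if x in s]; longest = max(map(len, candidates));
-- next(s for s in candidates if len(s) == longest).  'none' models the (unreachable in use)
-- ValueError of max() on an empty candidate list.
def klB_champion (subs : List (List Int)) (x : Int) : Option (List Int) :=
  let candidates := subs.filter (fun s => s.contains x)
  match PySem.List.max? (candidates.map (fun s => (s.length : Int))) (fun n => n) with
  | none => none
  | some longest => candidates.find? (fun s => ((s.length : Int) == longest))

def keep_longest_unique_sublists_with_distances_alt (input_list_with_distances : List (List Int × Int)) : List (List Int × Int) :=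
  let subs := input_list_with_distances.map Prod.fst
  (PySem.List.enumerate input_list_with_distances).foldl
    (fun acc ip =>
      if (PySem.List.slice subs none (some ip.1)).contains ip.2.1 then acc
      else if ip.2.1.all (fun x => klB_champion subs x == some ip.2.1) then acc ++ [ip.2]
      else acc) []

-- ===== PRECONDITION & SPEC =====
def Spec_keep_longest_unique_sublists_with_distances (input_list_with_distances : List (List Int × Int)) (out : List (List Int × Int)) : Prop := out = keep_longest_unique_sublists_with_distances_alt input_list_with_distances
instance (input_list_with_distances : List (List Int × Int)) (out : List (List Int × Int)) : Decidable (Spec_keep_longest_unique_sublists_with_distances input_list_with_distances out) := by unfold Spec_keep_longest_unique_sublists_with_distances; infer_instance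

-- ===== CLAIM (what is proved, stated in full; the proofs are below) =====
def Claim_equal_keep_longest_unique_sublists_with_distances : Prop := ∀ (input_list_with_distances : List (List Int × Int)), Dom_keep_longest_unique_sublists_with_distances input_list_with_distances → Spec_keep_longest_unique_sublists_with_distances input_list_with_distances (keep_longest_unique_sublists_with_distances input_list_with_distances)

-- ===== LEMMAS AND PROOFS =====

-- "first longest sublist containing x", computed by head recursion (proof-side spec)
def klFm (input : List (List Int × Int)) (x : Int) : Option (List Int × Int) :=
  match input with
  | [] => none
  | (s, t) :: r =>
    match klFm r x with
    | none => if s.contains x then some (s, t) else none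
    | some q => if s.contains x ∧ q.1.length ≤ s.length then some (s, t) else some q

-- effect of one dict update on one key, as a function of the old value
def klF (sl : List Int) (t : Int) (o : Option (List Int × Int)) : Option (List Int × Int) :=
  match o with
  | none => some (sl, t)
  | some q => if sl.length > q.1.length then some (sl, t) else some q

def klComb (o1 o2 : Option (List Int × Int)) : Option (List Int × Int) :=
  match o1, o2 with
  | none, o => o
  | some p, none => some p
  | some p, some q => if q.1.length > p.1.length then some q else some p

lemma klF_idem (sl : List Int) (t : Int) (o : Option (List Int × Int)) :
    klF sl t (klF sl t o) = klF sl t o := by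
  rcases o with _ | q
  · simp [klF]
  · simp [klF]; split_ifs <;> simp_all

lemma klA_inner_get? (s : List Int) (sl : List Int) (t : Int) :
    ∀ (d : PySem.Dict Int (List Int × Int)) (x : Int),
    (s.foldl (fun d item =>
      match d.get? item with
      | none => d.insert item (sl, t)
      | some q => if sl.length > q.1.length then d.insert item (sl, t) else d) d).get? x
    = if x ∈ s then klF sl t (d.get? x) else d.get? x := by
  induction s with
  | nil => intro d x; simp
  | cons a s ih =>
    intro d x
    simp only [List.foldl_cons, ih, List.mem_cons]
    by_cases hax : x = a
    · subst hax
      have hstep : (match d.get? x with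
          | none => d.insert x (sl, t)
          | some q => if sl.length > q.1.length then d.insert x (sl, t) else d).get? x
          = klF sl t (d.get? x) := by
        rcases h : d.get? x with _ | q
        · simp [PySem.Dict.get?_insert_self, klF]
        · simp only [klF]
          split_ifs with hlen
          · simp [PySem.Dict.get?_insert_self]
          · simp [h]
      rw [hstep]
      by_cases hx : x ∈ s <;> simp [hx, klF_idem]
    · have hstep : (match d.get? a with
          | none => d.insert a (sl, t)
          | some q => if sl.length > q.1.length then d.insert a (sl, t) else d).get? x
          = d.get? x := by
        rcases h : d.get? a with _ | q
        · exact PySem.Dict.get?_insert_of_ne _ _ hax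
        · dsimp only
          split_ifs
          · exact PySem.Dict.get?_insert_of_ne _ _ hax
          · rfl
      rw [hstep]
      by_cases hx : x ∈ s <;> simp [hx, hax]

lemma klA_update_get? (sl : List Int) (t : Int) (d : PySem.Dict Int (List Int × Int)) (x : Int) :
    (klA_update sl t d).get? x = if x ∈ sl then klF sl t (d.get? x) else d.get? x := by
  unfold klA_update
  exact klA_inner_get? sl sl t d x

lemma klStep (s : List Int) (t : Int) (o1 o2 : Option (List Int × Int)) :
    klComb (klF s t o1) o2
    = klComb o1 (match o2 with
        | none => some (s, t)
        | some q => if q.1.length ≤ s.length then some (s, t) else some q) := by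
  rcases o1 with _ | p <;> rcases o2 with _ | q <;>
    dsimp only [klF] <;> (try split_ifs) <;> dsimp only [klComb] <;>
    (first | rfl | (split_ifs <;> first | rfl | (exfalso; omega)))

lemma klA_pass1_get? : ∀ (input : List (List Int × Int)) (d : PySem.Dict Int (List Int × Int)) (x : Int),
    (input.foldl (fun d p => klA_update p.1 p.2 d) d).get? x = klComb (d.get? x) (klFm input x) := by
  intro input
  induction input with
  | nil => intro d x; simp [klFm, klComb]; rcases d.get? x with _ | p <;> rfl
  | cons p r ih =>
    intro d x
    rcases p with ⟨s, t⟩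
    rw [List.foldl_cons, ih, klA_update_get?]
    by_cases hx : x ∈ s
    · have hc : s.contains x = true := by simpa using hx
      rw [if_pos hx, klStep s t]
      congr 1
      rcases h2 : klFm r x with _ | q <;> simp [klFm, h2, hx]
    · have hc : s.contains x = false := by simpa using hx
      rw [if_neg hx]
      congr 1
      rcases h2 : klFm r x with _ | q <;> simp [klFm, h2, hx]

lemma klA_pass1_get?_empty (input : List (List Int × Int)) (x : Int) :
    (klA_pass1 input).get? x = klFm input x := by
  unfold klA_pass1
  rw [klA_pass1_get?]
  simp [klComb]

-- proof-side name for the "max length + first with that length" selection B performs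
def klPick (cands : List (List Int)) : Option (List Int) :=
  match PySem.List.max? (cands.map (fun s => (s.length : Int))) (fun n => n) with
  | none => none
  | some longest => cands.find? (fun s => ((s.length : Int) == longest))

lemma klB_champion_eq_pick (subs : List (List Int)) (x : Int) :
    klB_champion subs x = klPick (subs.filter (fun s => s.contains x)) := rfl

lemma klPick_cons (s : List Int) (C : List (List Int)) :
    klPick (s :: C) = (match klPick C with
      | none => some s
      | some q => if q.length ≤ s.length then some s else some q) := by
  unfold klPick
  simp only [List.map_cons]
  rcases hm : PySem.List.max? (C.map (fun s => (s.length : Int))) (fun n => n) with _ | m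
  · have hC : C = [] := by
      rw [PySem.List.max?_eq_none_iff] at hm
      simpa using hm
    subst hC
    have h0 : PySem.List.max? ([].map (fun s : List Int => (s.length : Int))) (fun n => n) = none := by
      rw [PySem.List.max?_eq_none_iff]; rfl
    rw [h0]
    simp [PySem.List.max?_id_cons]
  · have hmem : m ∈ C.map (fun s => (s.length : Int)) := PySem.List.max?_mem hm
    have hmax : ∀ y ∈ C.map (fun s => (s.length : Int)), y ≤ m :=
      fun y hy => PySem.List.max?_isMax hm y hy
    rcases hf : C.find? (fun s => ((s.length : Int) == m)) with _ | q
    · exfalso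
      rcases List.mem_map.mp hmem with ⟨c, hcC, hclen⟩
      have := List.find?_eq_none.mp hf c hcC
      simp [hclen] at this
    · have hq : (q.length : Int) = m := by
        have := List.find?_some hf
        simpa using this
      rcases hm' : PySem.List.max? ((s.length : Int) :: C.map (fun s => (s.length : Int))) (fun n => n) with _ | m'
      · rw [PySem.List.max?_eq_none_iff] at hm'
        simp at hm'
      · have hmem' : m' ∈ (s.length : Int) :: C.map (fun s => (s.length : Int)) :=
          PySem.List.max?_mem hm'
        have hsle : (s.length : Int) ≤ m' :=
          PySem.List.max?_isMax hm' _ (List.mem_cons_self ..)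
        have hmle : m ≤ m' :=
          PySem.List.max?_isMax hm' m (List.mem_cons_of_mem _ hmem)
        have hm'le : m' = (s.length : Int) ∨ m' ≤ m := by
          rcases List.mem_cons.mp hmem' with h | h
          · exact Or.inl h
          · exact Or.inr (hmax m' h)
        simp only [hm', hm, hf]
        by_cases hsl : m ≤ (s.length : Int)
        · have hm'eq : m' = (s.length : Int) := by omega
          rw [List.find?_cons_of_pos (by simp [hm'eq])]
          have hql : q.length ≤ s.length := by omega
          simp [hql]
        · have hm'eq : m' = m := by omega
          rw [List.find?_cons_of_neg (by simp [hm'eq]; omega), hm'eq, hf]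
          have hql : ¬ q.length ≤ s.length := by omega
          simp [hql]

lemma klB_champion_eq (input : List (List Int × Int)) (x : Int) :
    klB_champion (input.map Prod.fst) x = (klFm input x).map Prod.fst := by
  induction input with
  | nil => rfl
  | cons p r ih =>
    rcases p with ⟨s, t⟩
    rw [klB_champion_eq_pick] at ih ⊢
    by_cases hc : s.contains x
    · rw [List.map_cons, List.filter_cons, if_pos hc, klPick_cons, ih]
      have hxs : x ∈ s := by simpa using hc
      rcases h2 : klFm r x with _ | q
      · simp [klFm, h2, hxs]
      · by_cases hql : q.1.length ≤ s.length <;> simp [klFm, h2, hxs, hql]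
    · rw [List.map_cons, List.filter_cons, if_neg (by simpa using hc), ih]
      have hxs : x ∉ s := by simpa using hc
      rcases h2 : klFm r x with _ | q <;> simp [klFm, h2, hxs]

lemma klChk_eq (input : List (List Int × Int)) (s : List Int) :
    klA_check (klA_pass1 input) s
    = s.all (fun x => klB_champion (input.map Prod.fst) x == some s) := by
  unfold klA_check
  have h : ∀ x : Int, (match (klA_pass1 input).get? x with
      | none => false
      | some q => q.1 == s) = (klB_champion (input.map Prod.fst) x == some s) := by
    intro x
    rw [klA_pass1_get?_empty, klB_champion_eq]
    rcases klFm input x with _ | q <;> simp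
  simp only [h]

lemma klPhase2 (input : List (List Int × Int)) (chk : List Int → Bool) :
    ∀ (rest pre out : List (List Int × Int)) (seen : PySem.Set (List Int)),
    input = pre ++ rest →
    (∀ V, PySem.Set.contains seen V = true ↔ (V ∈ pre.map Prod.fst ∧ chk V = true)) →
    (rest.foldl (fun (acc : List (List Int × Int) × PySem.Set (List Int)) p =>
        if PySem.Set.contains acc.2 p.1 then acc
        else if chk p.1 then (acc.1 ++ [p], PySem.Set.add acc.2 p.1) else acc) (out, seen)).1
    = (PySem.List.enumerate rest (pre.length : Int)).foldl
        (fun acc ip =>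
          if (PySem.List.slice (input.map Prod.fst) none (some ip.1)).contains ip.2.1 then acc
          else if chk ip.2.1 then acc ++ [ip.2] else acc) out := by
  intro rest
  induction rest with
  | nil => intro pre out seen _ _; simp [PySem.List.enumerate_nil]
  | cons p r ih =>
    intro pre out seen hsplit hinv
    rw [PySem.List.enumerate_cons, List.foldl_cons, List.foldl_cons]
    have hslice : PySem.List.slice (input.map Prod.fst) none (some (pre.length : Int))
        = pre.map Prod.fst := by
      rw [PySem.List.slice_to_natCast, hsplit, List.map_append,
        List.take_left' (by simp)]
    have hlen1 : ((pre ++ [p]).length : Int) = (pre.length : Int) + 1 := by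
      simp
    by_cases hpm : p.1 ∈ pre.map Prod.fst
    · have hcont : (pre.map Prod.fst).contains p.1 = true := by simpa using hpm
      by_cases hchk : chk p.1 = true
      · have hseen : PySem.Set.contains seen p.1 = true := (hinv p.1).mpr ⟨hpm, hchk⟩
        have hinv' : ∀ V, PySem.Set.contains seen V = true
            ↔ (V ∈ (pre ++ [p]).map Prod.fst ∧ chk V = true) := by
          intro V
          rw [hinv V]
          constructor
          · rintro ⟨hv, hk⟩; exact ⟨by simp [hv], hk⟩
          · rintro ⟨hv, hk⟩
            rw [List.map_append] at hv
            rcases List.mem_append.mp hv with hv' | hv'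
            · exact ⟨hv', hk⟩
            · have hVp : V = p.1 := by simpa using hv'
              subst hVp; exact ⟨hpm, hk⟩
        have := ih (pre ++ [p]) out seen (by simp [hsplit]) hinv'
        rw [hlen1] at this
        simp only [hseen, hslice, hcont, if_true]
        exact this
      · have hseen : PySem.Set.contains seen p.1 = false := by
          rcases h : PySem.Set.contains seen p.1 with _ | _
          · rfl
          · exact absurd ((hinv p.1).mp h).2 hchk
        have hinv' : ∀ V, PySem.Set.contains seen V = true
            ↔ (V ∈ (pre ++ [p]).map Prod.fst ∧ chk V = true) := by
          intro V
          rw [hinv V]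
          constructor
          · rintro ⟨hv, hk⟩; exact ⟨by simp [hv], hk⟩
          · rintro ⟨hv, hk⟩
            rw [List.map_append] at hv
            rcases List.mem_append.mp hv with hv' | hv'
            · exact ⟨hv', hk⟩
            · have hVp : V = p.1 := by simpa using hv'
              subst hVp; exact absurd hk hchk
        have := ih (pre ++ [p]) out seen (by simp [hsplit]) hinv'
        rw [hlen1] at this
        simp only [hseen, hslice, hcont, if_true, hchk, if_false, Bool.false_eq_true]
        exact this
    · have hcont : (pre.map Prod.fst).contains p.1 = false := by simpa using hpm
      have hseen : PySem.Set.contains seen p.1 = false := by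
        rcases h : PySem.Set.contains seen p.1 with _ | _
        · rfl
        · exact absurd ((hinv p.1).mp h).1 hpm
      by_cases hchk : chk p.1 = true
      · have hinv' : ∀ V, PySem.Set.contains (PySem.Set.add seen p.1) V = true
            ↔ (V ∈ (pre ++ [p]).map Prod.fst ∧ chk V = true) := by
          intro V
          rw [PySem.Set.contains_iff, PySem.Set.mem_add]
          constructor
          · rintro (hv | hv)
            · have := (hinv V).mp (by rwa [PySem.Set.contains_iff])
              exact ⟨by simp [this.1], this.2⟩
            · subst hv; exact ⟨by simp, hchk⟩
          · rintro ⟨hv, hk⟩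
            rw [List.map_append] at hv
            rcases List.mem_append.mp hv with hv' | hv'
            · left; rw [← PySem.Set.contains_iff]; exact (hinv V).mpr ⟨hv', hk⟩
            · right; simpa using hv'
        have := ih (pre ++ [p]) (out ++ [p]) (PySem.Set.add seen p.1) (by simp [hsplit]) hinv'
        rw [hlen1] at this
        simp only [hseen, hslice, hcont, hchk, if_true, if_false, Bool.false_eq_true]
        exact this
      · have hinv' : ∀ V, PySem.Set.contains seen V = true
            ↔ (V ∈ (pre ++ [p]).map Prod.fst ∧ chk V = true) := by
          intro V
          rw [hinv V]
          constructor
          · rintro ⟨hv, hk⟩; exact ⟨by simp [hv], hk⟩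
          · rintro ⟨hv, hk⟩
            rw [List.map_append] at hv
            rcases List.mem_append.mp hv with hv' | hv'
            · exact ⟨hv', hk⟩
            · have hVp : V = p.1 := by simpa using hv'
              subst hVp; exact absurd hk hchk
        have := ih (pre ++ [p]) out seen (by simp [hsplit]) hinv'
        rw [hlen1] at this
        simp only [hseen, hslice, hcont, hchk, if_false, Bool.false_eq_true]
        exact this

-- ===== VERDICT (by name: the statement is the Claim_ definition above) =====
theorem keep_longest_unique_sublists_with_distances_spec : Claim_equal_keep_longest_unique_sublists_with_distances := by
  intro input _hdom
  unfold Spec_keep_longest_unique_sublists_with_distances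
  unfold keep_longest_unique_sublists_with_distances keep_longest_unique_sublists_with_distances_alt
  have h0 : ∀ V : List Int, PySem.Set.contains (PySem.Set.empty) V = true
      ↔ (V ∈ ([] : List (List Int × Int)).map Prod.fst
          ∧ (fun s => s.all (fun x => klB_champion (input.map Prod.fst) x == some s)) V = true) := by
    intro V; simp [PySem.Set.empty, PySem.Set.contains]
  have h := klPhase2 input
      (fun s => s.all (fun x => klB_champion (input.map Prod.fst) x == some s))
      input [] [] PySem.Set.empty rfl h0
  simp only [List.length_nil, Nat.cast_zero] at h
  simp only [klChk_eq]
  exact h
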